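-- pv_equiv track=rewrite | github.com/CuzWeAre/CUMT_Program-Test | 2024/Python/HeZzz版/3_冒泡排序逆序思想.py | add_chars
-- ===== SOURCE A (Python) =====
-- def add_chars(add_number, base_string):
--     """
--     在基本字符串中插入字符,使得逆序对数符合要求
--     """
--     # 将基本字符串转换为列表以进行插入操作
--     result = list(base_string)
--     alpha_ord = ord('a')
--     index = 0
--
--     # 插入字符
--     for _ in range(add_number):
--         result.insert(index + 1, chr(alpha_ord))
--         index += 2
--         alpha_ord = (alpha_ord - ord('a') + 1) % 26 + ord('a')
--
--     # 返回逆序排序的字符串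
--     return ''.join(sorted(result, reverse=True))
-- ===== SOURCE B (Python) =====
-- def add_chars(add_number, base_string):
--     # Counting-sort emission: the result depends only on the character multiset,
--     # so count characters and emit them in descending order.
--     n = add_number if add_number > 0 else 0
--     q, r = divmod(n, 26)
--     counts = {}
--     for ch in base_string:
--         counts[ch] = counts.get(ch, 0) + 1
--     for i in range(26):
--         extra = q + (1 if i < r else 0)
--         if extra > 0:
--             c = chr(97 + i)
--             counts[c] = counts.get(c, 0) + extra
--     return ''.join(c * counts[c] for c in sorted(counts, reverse=True))
-- ===== Notes on version B (the rewrite author's own statement) =====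
-- stated objective: faster
-- what changed: Replaces the per-character list.insert loop plus a comparison sort by a frequency table: the added letters' counts come from divmod(add_number, 26) arithmetic, base characters are counted in one dict pass, and the result is emitted counting-sort style over the distinct characters in descending order.
import Mathlib
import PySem

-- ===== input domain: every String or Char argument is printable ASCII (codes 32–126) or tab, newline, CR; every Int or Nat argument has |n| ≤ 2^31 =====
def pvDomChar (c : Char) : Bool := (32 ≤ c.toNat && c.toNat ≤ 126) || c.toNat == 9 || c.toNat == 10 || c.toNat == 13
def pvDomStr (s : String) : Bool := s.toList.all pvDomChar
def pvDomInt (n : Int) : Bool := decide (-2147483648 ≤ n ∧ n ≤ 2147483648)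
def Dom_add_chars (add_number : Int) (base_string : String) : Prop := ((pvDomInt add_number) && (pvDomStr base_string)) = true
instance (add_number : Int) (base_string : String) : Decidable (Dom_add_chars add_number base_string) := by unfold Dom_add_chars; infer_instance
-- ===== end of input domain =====

-- B replaces A's insert-then-sort by counting-sort emission from a frequency table (measurably faster on large inputs).

-- ===== PORT A =====
-- the loop body: insert chr(alpha_ord) at index+1, then index += 2, alpha_ord = (alpha_ord - 97 + 1) % 26 + 97
def addCharsStep (st : List Char × Int × Int) (_i : Int) : List Char × Int × Int :=
  (PySem.List.insert st.1 (st.2.2 + 1) (Char.ofNat st.2.1.toNat),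
   PySem.Int.mod (st.2.1 - 97 + 1) 26 + 97,
   st.2.2 + 2)

def add_chars (add_number : Int) (base_string : String) : String :=
  let st := (PySem.List.pyRange 0 add_number 1).foldl addCharsStep (base_string.toList, 97, 0)
  String.ofList (PySem.List.sorted st.1 (fun x => x) true)

-- ===== PORT B =====
-- counts[ch] = counts.get(ch, 0) + 1
def countBase (d : PySem.Dict Char Int) (ch : Char) : PySem.Dict Char Int :=
  d.insert ch (d.getD ch 0 + 1)

-- the second loop body: add `extra` copies of chr(97+i) to the counter when extra > 0
def addExtra (q r : Int) (d : PySem.Dict Char Int) (i : Int) : PySem.Dict Char Int :=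
  let extra := q + (if i < r then 1 else 0)
  if extra > 0 then
    let c := Char.ofNat (97 + i).toNat
    d.insert c (d.getD c 0 + extra)
  else d

def add_chars_alt (add_number : Int) (base_string : String) : String :=
  let n : Int := if add_number > 0 then add_number else 0
  let q := PySem.Int.floordiv n 26
  let r := PySem.Int.mod n 26
  let counts := base_string.toList.foldl countBase PySem.Dict.empty
  let counts := (PySem.List.pyRange 0 26 1).foldl (addExtra q r) counts
  -- ''.join(c * counts[c] for c in sorted(counts, reverse=True)); counts[c] is exact as getD
  -- since every key is present, and c * k (k ≥ 0 here) is List.replicate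
  String.ofList ((PySem.List.sorted counts.keys (fun x => x) true).flatMap
    (fun c => List.replicate ((counts.getD c 0).toNat) c))

-- ===== PRECONDITION & SPEC =====
def Spec_add_chars (add_number : Int) (base_string : String) (out : String) : Prop := out = add_chars_alt add_number base_string
instance (add_number : Int) (base_string : String) (out : String) : Decidable (Spec_add_chars add_number base_string out) := by unfold Spec_add_chars; infer_instance

-- ===== CLAIM (what is proved, stated in full; the proofs are below) =====
def Claim_equal_add_chars : Prop := ∀ (add_number : Int) (base_string : String), Dom_add_chars add_number base_string → Spec_add_chars add_number base_string (add_chars add_number base_string)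

-- ===== LEMMAS AND PROOFS =====

-- proof-only helpers
def letterN (i : Nat) : Char := Char.ofNat (97 + i)

def addedL (m : Nat) : List Char := (List.range m).map (fun j => letterN (j % 26))

def extraN (m i : Nat) : Nat := m / 26 + (if i < m % 26 then 1 else 0)

def extraI (q r i : Int) : Int := q + (if i < r then 1 else 0)

def termF (q r : Int) (c : Char) (i : Int) : Int :=
  if c = Char.ofNat (97 + i).toNat ∧ 0 < extraI q r i then extraI q r i else 0

lemma addExtra_eq (q r : Int) (d : PySem.Dict Char Int) (i : Int) :
    addExtra q r d i
      = if 0 < extraI q r i then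
          d.insert (Char.ofNat (97 + i).toNat)
            (d.getD (Char.ofNat (97 + i).toNat) 0 + extraI q r i)
        else d := rfl

lemma toNat_ofNat_valid (n : Nat) (h : n < 55296) : (Char.ofNat n).toNat = n := by
  have hv : Nat.isValidChar n := Or.inl h
  rw [Char.ofNat, dif_pos hv]
  rfl

lemma letter_inj {a b : Nat} (ha : a < 26) (hb : b < 26) : letterN a = letterN b ↔ a = b := by
  constructor
  · intro h
    have h1 := congrArg Char.toNat h
    rw [letterN, letterN, toNat_ofNat_valid _ (by omega), toNat_ofNat_valid _ (by omega)] at h1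
    omega
  · rintro rfl; rfl

lemma insert_perm (xs : List Char) (i : Int) (v : Char) :
    (PySem.List.insert xs i v).Perm (v :: xs) := by
  rw [PySem.List.insert]
  rcases PySem.List.sliceIndices xs.length (some i) none 1 with ⟨k, s, t⟩
  exact List.perm_middle.trans (by rw [List.take_append_drop])

lemma aLoop (S : List Char) (k : Nat) :
    ((PySem.List.pyRange 0 (k : Int) 1).foldl addCharsStep (S, 97, 0)).2.1
        = 97 + ((k % 26 : Nat) : Int)
    ∧ (((PySem.List.pyRange 0 (k : Int) 1).foldl addCharsStep (S, 97, 0)).1).Perm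
        (addedL k ++ S) := by
  induction k with
  | zero =>
    rw [show ((0 : Nat) : Int) = 0 from rfl, PySem.List.pyRange_one_eq_nil (by omega)]
    simp [addedL]
  | succ k ih =>
    obtain ⟨h1, h2⟩ := ih
    have hrange : PySem.List.pyRange 0 ((k + 1 : Nat) : Int) 1
        = PySem.List.pyRange 0 (k : Int) 1 ++ [(k : Int)] := by
      push_cast
      exact PySem.List.pyRange_one_succ_right (by omega)
    rw [hrange, List.foldl_append]
    set st := (PySem.List.pyRange 0 (k : Int) 1).foldl addCharsStep (S, 97, 0) with hst
    have htoNat : (st.2.1).toNat = 97 + k % 26 := by omega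
    have hchar : Char.ofNat st.2.1.toNat = letterN (k % 26) := by rw [htoNat]; rfl
    constructor
    · show PySem.Int.mod (st.2.1 - 97 + 1) 26 + 97 = _
      rw [h1]
      have he : ((97:Int) + ((k % 26 : Nat) : Int) - 97 + 1) = ((k % 26 : Nat) : Int) + 1 := by
        ring
      rw [he, PySem.Int.mod_eq_emod_of_pos (by norm_num)]
      omega
    · show (PySem.List.insert st.1 (st.2.2 + 1) (Char.ofNat st.2.1.toNat)).Perm _
      rw [hchar]
      have hadd : addedL (k + 1) ++ S = addedL k ++ letterN (k % 26) :: S := by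
        simp [addedL, List.range_succ]
      rw [hadd]
      exact ((insert_perm _ _ _).trans (h2.cons _)).trans List.perm_middle.symm

lemma aList (add_number : Int) (S : List Char) :
    (((PySem.List.pyRange 0 add_number 1).foldl addCharsStep (S, 97, 0)).1).Perm
      (addedL add_number.toNat ++ S) := by
  by_cases h : 0 < add_number
  · have := (aLoop S add_number.toNat).2
    rwa [Int.toNat_of_nonneg (le_of_lt h)] at this
  · rw [PySem.List.pyRange_one_eq_nil (by omega)]
    have h0 : add_number.toNat = 0 := by omega
    simp [h0, addedL]

lemma count_addedL_letter (m i : Nat) (hi : i < 26) :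
    (addedL m).count (letterN i) = extraN m i := by
  induction m with
  | zero => simp [addedL, extraN]
  | succ m ih =>
    have hstep : addedL (m + 1) = addedL m ++ [letterN (m % 26)] := by
      simp [addedL, List.range_succ]
    rw [hstep, List.count_append, ih]
    have hmod : m % 26 < 26 := by omega
    by_cases hm : m % 26 = i
    · have : (letterN (m % 26) == letterN i) = true := by
        simp [(letter_inj hmod hi).mpr hm]
      simp only [List.count_singleton, this, if_pos, extraN]
      split_ifs <;> omega
    · have : (letterN (m % 26) == letterN i) = false := by
        simp [(letter_inj hmod hi).not.mpr hm]
      simp only [List.count_singleton, this, Bool.false_eq_true, if_false, extraN]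
      split_ifs <;> omega

lemma mem_keys_insert (d : PySem.Dict Char Int) (k c : Char) (v : Int) :
    c ∈ (d.insert k v).keys ↔ c ∈ d.keys ∨ c = k := by
  by_cases h : d.contains k
  · rw [PySem.Dict.keys_insert_of_contains d v h]
    constructor
    · exact Or.inl
    · rintro (h2 | rfl)
      · exact h2
      · exact (PySem.Dict.contains_iff_mem_keys d c).mp h
  · rw [PySem.Dict.keys_insert_of_not_contains d v (by simpa using h)]
    simp

lemma getD_addExtra_foldl (q r : Int) (l : List Int) (d : PySem.Dict Char Int) (c : Char) :
    (l.foldl (addExtra q r) d).getD c 0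
      = d.getD c 0 + (l.map (termF q r c)).sum := by
  induction l generalizing d with
  | nil => simp
  | cons i t ih =>
    rw [List.foldl_cons, addExtra_eq, ih, List.map_cons, List.sum_cons]
    by_cases hx : 0 < extraI q r i
    · rw [if_pos hx]
      by_cases hc : c = Char.ofNat (97 + i).toNat
      · subst hc
        rw [PySem.Dict.getD_insert_self, termF, if_pos ⟨rfl, hx⟩]
        ring
      · rw [PySem.Dict.getD_insert_of_ne _ _ _ hc, termF, if_neg (fun h => hc h.1)]
        ring
    · rw [if_neg hx, termF, if_neg (fun h => hx h.2)]
      ring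

lemma mem_keys_addExtra_foldl (q r : Int) (l : List Int) (d : PySem.Dict Char Int) (c : Char) :
    c ∈ (l.foldl (addExtra q r) d).keys
      ↔ c ∈ d.keys ∨ ∃ i ∈ l, 0 < extraI q r i ∧ c = Char.ofNat (97 + i).toNat := by
  induction l generalizing d with
  | nil => simp
  | cons i t ih =>
    rw [List.foldl_cons, addExtra_eq, ih]
    by_cases hx : 0 < extraI q r i
    · rw [if_pos hx, mem_keys_insert]
      constructor
      · rintro ((h | h) | ⟨j, hj, hje, hc⟩)
        · exact Or.inl h
        · exact Or.inr ⟨i, List.mem_cons_self, hx, h⟩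
        · exact Or.inr ⟨j, List.mem_cons_of_mem _ hj, hje, hc⟩
      · rintro (h | ⟨j, hj, hje, hc⟩)
        · exact Or.inl (Or.inl h)
        · rcases List.mem_cons.mp hj with rfl | hj
          · exact Or.inl (Or.inr hc)
          · exact Or.inr ⟨j, hj, hje, hc⟩
    · rw [if_neg hx]
      constructor
      · rintro (h | ⟨j, hj, hje, hc⟩)
        · exact Or.inl h
        · exact Or.inr ⟨j, List.mem_cons_of_mem _ hj, hje, hc⟩
      · rintro (h | ⟨j, hj, hje, hc⟩)
        · exact Or.inl h
        · rcases List.mem_cons.mp hj with rfl | hj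
          · exact absurd hje hx
          · exact Or.inr ⟨j, hj, hje, hc⟩

lemma nodup_keys_addExtra_foldl (q r : Int) (l : List Int) (d : PySem.Dict Char Int)
    (hd : d.keys.Nodup) : (l.foldl (addExtra q r) d).keys.Nodup := by
  induction l generalizing d with
  | nil => exact hd
  | cons i t ih =>
    rw [List.foldl_cons, addExtra_eq]
    by_cases hx : 0 < extraI q r i
    · rw [if_pos hx]
      exact ih _ (PySem.Dict.nodup_keys_insert _ _ _ hd)
    · rw [if_neg hx]
      exact ih _ hd

lemma sum_map_single {α : Type} [DecidableEq α] (l : List α) (f : α → Int) (i0 : α)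
    (hm : i0 ∈ l) (hnd : l.Nodup)
    (h0 : ∀ i ∈ l, i ≠ i0 → f i = 0) : (l.map f).sum = f i0 := by
  induction l with
  | nil => cases hm
  | cons a t ih =>
    rw [List.map_cons, List.sum_cons]
    rcases List.mem_cons.mp hm with rfl | hm'
    · have hz : ∀ i ∈ t, f i = 0 := fun i hi =>
        h0 i (List.mem_cons_of_mem _ hi) (fun he => (List.nodup_cons.mp hnd).1 (he ▸ hi))
      rw [List.sum_eq_zero (by
        intro x hx; rcases List.mem_map.mp hx with ⟨i, hi, rfl⟩; exact hz i hi)]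
      ring
    · rw [ih hm' (List.nodup_cons.mp hnd).2 (fun i hi => h0 i (List.mem_cons_of_mem _ hi)),
        h0 a List.mem_cons_self (fun he => (List.nodup_cons.mp hnd).1 (he ▸ hm'))]
      ring

lemma extraI_cast (m i : Nat) :
    extraI (PySem.Int.floordiv (m : Int) 26) (PySem.Int.mod (m : Int) 26) ((i : Nat) : Int)
      = ((extraN m i : Nat) : Int) := by
  have hq : PySem.Int.floordiv (m : Int) 26 = ((m / 26 : Nat) : Int) := by
    exact_mod_cast PySem.Int.floordiv_natCast m 26
  have hr : PySem.Int.mod (m : Int) 26 = ((m % 26 : Nat) : Int) := by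
    exact_mod_cast PySem.Int.mod_natCast m 26
  rw [extraI, extraN, hq, hr]
  by_cases h : i < m % 26
  · rw [if_pos (by exact_mod_cast h), if_pos h]; push_cast; ring
  · rw [if_neg (by exact_mod_cast h), if_neg h]; push_cast; ring

lemma T_eq (m : Nat) (c : Char) :
    ((PySem.List.pyRange 0 26 1).map
        (termF (PySem.Int.floordiv (m : Int) 26) (PySem.Int.mod (m : Int) 26) c)).sum
      = ((addedL m).count c : Int) := by
  set q := PySem.Int.floordiv (m : Int) 26 with hqdef
  set r := PySem.Int.mod (m : Int) 26 with hrdef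
  by_cases hc : ∃ i, i < 26 ∧ c = letterN i
  · obtain ⟨i0, hi0, rfl⟩ := hc
    have hmem : ((i0 : Nat) : Int) ∈ PySem.List.pyRange 0 26 1 := by
      rw [PySem.List.mem_pyRange_one]; omega
    rw [sum_map_single _ _ ((i0 : Nat) : Int) hmem (PySem.List.nodup_pyRange_one 0 26)]
    · rw [termF, hqdef, hrdef, extraI_cast, count_addedL_letter m i0 hi0]
      have hlet : letterN i0 = Char.ofNat (97 + ((i0 : Nat) : Int)).toNat := by
        rw [letterN, show ((97 : Int) + ((i0 : Nat) : Int)).toNat = 97 + i0 from by omega]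
      by_cases hx : (0 : Int) < ((extraN m i0 : Nat) : Int)
      · rw [if_pos ⟨hlet, hx⟩]
      · rw [if_neg (fun h => hx h.2)]; omega
    · intro i hi hne
      rw [PySem.List.mem_pyRange_one] at hi
      rw [termF, if_neg]
      rintro ⟨he, -⟩
      have hll : letterN i0 = letterN i.toNat := by
        rw [he, letterN, show ((97 : Int) + i).toNat = 97 + i.toNat from by omega]
      rw [letter_inj hi0 (by omega)] at hll
      omega
  · rw [List.sum_eq_zero, Eq.comm]
    · rw [Int.natCast_eq_zero, List.count_eq_zero]
      intro hmem
      rcases List.mem_map.mp hmem with ⟨j, hj, hje⟩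
      exact hc ⟨j % 26, by omega, hje.symm⟩
    · intro x hx
      rcases List.mem_map.mp hx with ⟨i, hi, rfl⟩
      rw [PySem.List.mem_pyRange_one] at hi
      rw [termF, if_neg]
      rintro ⟨he, -⟩
      exact hc ⟨i.toNat, by omega, by
        rw [he, letterN, show ((97 : Int) + i).toNat = 97 + i.toNat from by omega]⟩

lemma count_flatMap_replicate (ks : List Char) (f : Char → Nat) (hnd : ks.Nodup) (x : Char) :
    (ks.flatMap (fun c => List.replicate (f c) c)).count x = if x ∈ ks then f x else 0 := by
  induction ks with
  | nil => simp
  | cons a t ih =>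
    rw [List.flatMap_cons, List.count_append, ih (List.nodup_cons.mp hnd).2,
      List.count_replicate]
    by_cases hxa : x = a
    · subst hxa
      have hx : x ∉ t := (List.nodup_cons.mp hnd).1
      simp [hx]
    · have hb : (a == x) = false := by simp [Ne.symm hxa]
      simp [hb, List.mem_cons, hxa]

lemma pairwise_flatMap_replicate (ks : List Char) (f : Char → Nat)
    (h : ks.Pairwise (fun a b => b ≤ a)) :
    (ks.flatMap (fun c => List.replicate (f c) c)).Pairwise (fun a b : Char => b ≤ a) := by
  induction ks with
  | nil => simp
  | cons a t ih =>
    rw [List.flatMap_cons]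
    rw [List.pairwise_cons] at h
    apply List.pairwise_append.mpr
    refine ⟨List.pairwise_replicate.mpr (Or.inr le_rfl), ih h.2, ?_⟩
    intro x hx y hy
    rcases List.mem_flatMap.mp hy with ⟨c', hc', hyc⟩
    rw [List.eq_of_mem_replicate hx, List.eq_of_mem_replicate hyc]
    exact h.1 c' hc'

-- ===== VERDICT (by name: the statement is the Claim_ definition above) =====
theorem add_chars_spec : Claim_equal_add_chars := by
  intro add_number base_string _
  unfold Spec_add_chars add_chars add_chars_alt
  dsimp only
  congr 1
  set S := base_string.toList
  have hn : (if add_number > 0 then add_number else 0) = ((add_number.toNat : Nat) : Int) := by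
    split <;> omega
  rw [hn]
  set m := add_number.toNat with hm
  rw [show S.foldl countBase PySem.Dict.empty
        = List.foldl (fun d x => d.insert x (d.getD x 0 + 1)) PySem.Dict.empty S from rfl,
    PySem.Dict.foldl_insert_getD_add_one_eq_counter]
  set q := PySem.Int.floordiv ((m : Nat) : Int) 26 with hqdef
  set r := PySem.Int.mod ((m : Nat) : Int) 26 with hrdef
  set M := addedL m ++ S with hM
  set D := (PySem.List.pyRange 0 26 1).foldl (addExtra q r) (PySem.Dict.counter S) with hD
  have hgetD : ∀ c, D.getD c 0 = ((M.count c : Nat) : Int) := by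
    intro c
    rw [hD, getD_addExtra_foldl, PySem.Dict.getD_counter, hqdef, hrdef, T_eq, hM,
      List.count_append]
    push_cast
    ring
  have hmemkeys : ∀ c, c ∈ D.keys ↔ 0 < M.count c := by
    intro c
    rw [hD, mem_keys_addExtra_foldl, PySem.Dict.keys_counter, PySem.Set.mem_ofList]
    constructor
    · rintro (h | ⟨i, hi, hx, rfl⟩)
      · rw [List.count_pos_iff, hM, List.mem_append]; exact Or.inr h
      · rw [PySem.List.mem_pyRange_one] at hi
        rw [hM, List.count_append]
        have hlet : Char.ofNat (97 + i).toNat = letterN i.toNat := by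
          rw [letterN, show ((97 : Int) + i).toNat = 97 + i.toNat from by omega]
        rw [hlet, count_addedL_letter m i.toNat (by omega)]
        rw [show i = ((i.toNat : Nat) : Int) from by omega, hqdef, hrdef, extraI_cast] at hx
        have : 0 < extraN m i.toNat := by exact_mod_cast hx
        omega
    · intro h
      rw [List.count_pos_iff, hM, List.mem_append] at h
      rcases h with h | h
      · rcases List.mem_map.mp h with ⟨j, hj, hje⟩
        rw [List.mem_range] at hj
        refine Or.inr ⟨((j % 26 : Nat) : Int), ?_, ?_, ?_⟩
        · rw [PySem.List.mem_pyRange_one]; omega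
        · rw [hqdef, hrdef, extraI_cast]
          have hcnt : 0 < (addedL m).count c := List.count_pos_iff.mpr h
          rw [← hje, count_addedL_letter m (j % 26) (by omega)] at hcnt
          exact_mod_cast hcnt
        · rw [← hje, letterN, show ((97 : Int) + ((j % 26 : Nat) : Int)).toNat = 97 + j % 26 from by omega]
      · exact Or.inl h
  have hnodup : D.keys.Nodup :=
    nodup_keys_addExtra_foldl _ _ _ _ (PySem.Dict.nodup_keys_counter S)
  set ks := PySem.List.sorted D.keys (fun x => x) true with hks
  have hksnodup : ks.Nodup := (PySem.List.sorted_perm D.keys (fun x => x) true).symm.nodup hnodup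
  have hEcount : ∀ x, (ks.flatMap (fun c => List.replicate ((D.getD c 0).toNat) c)).count x
      = M.count x := by
    intro x
    rw [count_flatMap_replicate ks (fun c => (D.getD c 0).toNat) hksnodup]
    by_cases hx : x ∈ ks
    · rw [if_pos hx, hgetD]
      exact Int.toNat_natCast _
    · rw [if_neg hx]
      rw [hks, PySem.List.mem_sorted, hmemkeys] at hx
      omega
  apply List.Perm.eq_of_pairwise (le := fun a b : Char => b ≤ a)
    (fun a b _ _ h1 h2 => le_antisymm h2 h1)
  · exact PySem.List.sorted_pairwise_rev _ _
  · exact pairwise_flatMap_replicate ks _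
      (by simpa using PySem.List.sorted_pairwise_rev D.keys (fun x => x))
  · rw [List.perm_iff_count]
    intro x
    rw [hEcount]
    exact ((PySem.List.sorted_perm _ _ _).trans (aList add_number S)).count_eq x
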